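-- pv_equiv track=rewrite | github.com/martijnstraatsburg/bsc_thesis | prediction-phase/pipeline_unseen_dataset.py | limit_discussions
-- ===== SOURCE A (Python) =====
-- from collections import defaultdict
--
-- def limit_discussions(items: list, num_discussions: int) -> list:
--     # map by id
--     id_map = {i['name']: i for i in items}
--     # build children map
--     children = defaultdict(list)
--     for i in items:
--         pid = i.get('parent_id')
--         if pid and pid in id_map:
--             children[pid].append(i['name'])
--
--     def recurse_collect(root_id):
--         out = [id_map[root_id]]
--         for cid in children.get(root_id, []):
--             out.extend(recurse_collect(cid))
--         return out
--
--     result = []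
--     count = 0
--     for i in items:
--         if i['name'].startswith('t3_'):
--             if count >= num_discussions:
--                 break
--             result.extend(recurse_collect(i['name']))
--             count += 1
--     return result
-- ===== SOURCE B (Python) =====
-- def limit_discussions(items: list, num_discussions: int) -> list:
--     # Same maps as A, then an iterative stack DFS (reversed pushes keep sibling
--     # order) over the first num_discussions 't3_' roots instead of recursion.
--     id_map = {i['name']: i for i in items}
--     children = {}
--     for i in items:
--         pid = i.get('parent_id')
--         if pid and pid in id_map:
--             children.setdefault(pid, []).append(i['name'])
--     roots = [i['name'] for i in items if i['name'].startswith('t3_')]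
--     result = []
--     for rid in roots[:max(0, num_discussions)]:
--         stack = [rid]
--         while stack:
--             nid = stack.pop()
--             result.append(id_map[nid])
--             stack.extend(reversed(children.get(nid, [])))
--     return result
-- ===== Notes on version B (the rewrite author's own statement) =====
-- stated objective: alternative
-- what changed: The recursive recurse_collect plus the counting break-loop is replaced by slicing the first num_discussions 't3_' root names and draining each subtree with an iterative explicit-stack DFS (children pushed reversed so siblings pop in original order), with no recursion and no counter.
import Mathlib
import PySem

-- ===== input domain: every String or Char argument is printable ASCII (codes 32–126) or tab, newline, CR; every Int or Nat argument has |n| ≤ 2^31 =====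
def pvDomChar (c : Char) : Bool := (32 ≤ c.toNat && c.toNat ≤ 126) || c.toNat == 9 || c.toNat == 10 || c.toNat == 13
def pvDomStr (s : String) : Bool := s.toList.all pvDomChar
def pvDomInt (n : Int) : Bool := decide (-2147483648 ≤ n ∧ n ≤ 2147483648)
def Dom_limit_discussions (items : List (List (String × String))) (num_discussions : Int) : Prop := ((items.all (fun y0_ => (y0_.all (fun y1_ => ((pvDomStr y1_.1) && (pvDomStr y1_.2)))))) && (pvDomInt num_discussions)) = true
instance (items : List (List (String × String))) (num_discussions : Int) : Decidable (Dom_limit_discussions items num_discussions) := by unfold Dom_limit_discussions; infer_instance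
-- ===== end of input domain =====

-- B replaces A's recursive subtree collection and counting break-loop by slicing the
-- first num_discussions 't3_' root names and draining each subtree with an iterative
-- explicit-stack DFS (objective: alternative decomposition, same cost).

-- ===== PORT A =====
-- i['name'] / falsy i.get('parent_id'): lookups on the item as a Python dict.
-- Pre_ guarantees 'name' is present, so getD "" is exact where A does not raise;
-- a missing parent_id or the empty string is exactly the falsy pid A skips.
def pvName (i : List (String × String)) : String := PySem.Dict.getD (PySem.Dict.mk i) "name" ""
def pvPid (i : List (String × String)) : String := PySem.Dict.getD (PySem.Dict.mk i) "parent_id" ""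

-- id_map = {i['name']: i for i in items}
def pvIdMap (items : List (List (String × String))) : PySem.Dict String (List (String × String)) :=
  items.foldl (fun d i => d.insert (pvName i) i) PySem.Dict.empty

-- children = defaultdict(list); children[pid].append(i['name']) — the defaultdict
-- append is Dict.modify with default [].
def pvChildren (idm : PySem.Dict String (List (String × String)))
    (items : List (List (String × String))) : PySem.Dict String (List String) :=
  items.foldl (fun c i =>
    if pvPid i != "" && idm.contains (pvPid i) then
      c.modify (pvPid i) [] (· ++ [pvName i])
    else c) PySem.Dict.empty

-- recurse_collect; the fuel only bounds the recursion depth — under Pre_ (the reply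
-- graph reached from the processed roots is acyclic) items.length + 1 is sufficient.
def pvRecurse (idm : PySem.Dict String (List (String × String)))
    (ch : PySem.Dict String (List String)) : Nat → String → List (List (String × String))
  | 0, _ => []
  | fuel + 1, rid =>
      PySem.Dict.getD idm rid [] :: (PySem.Dict.getD ch rid []).flatMap (pvRecurse idm ch fuel)

-- the result loop with count and break
def pvLoopA (idm : PySem.Dict String (List (String × String)))
    (ch : PySem.Dict String (List String)) (fuel : Nat) (nd : Int) :
    List (List (String × String)) → Int → List (List (String × String)) → List (List (String × String))
  | [], _, res => res
  | i :: rest, cnt, res =>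
      if PySem.Str.startswith (pvName i) "t3_" then
        if cnt ≥ nd then res
        else pvLoopA idm ch fuel nd rest (cnt + 1) (res ++ pvRecurse idm ch fuel (pvName i))
      else pvLoopA idm ch fuel nd rest cnt res

def limit_discussions (items : List (List (String × String))) (num_discussions : Int) :
    List (List (String × String)) :=
  let idm := pvIdMap items
  let ch := pvChildren idm items
  pvLoopA idm ch (items.length + 1) num_discussions items 0 []

-- ===== PORT B =====
-- id_map = {i['name']: i for i in items}  (B's own comprehension, same line as A's)
def pvIdMapB (items : List (List (String × String))) : PySem.Dict String (List (String × String)) :=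
  items.foldl (fun d i => d.insert (pvName i) i) PySem.Dict.empty

-- children.setdefault(pid, []).append(i['name']) — the in-place append to the
-- setdefault list is Dict.modify with default [].
def pvChildrenB (idm : PySem.Dict String (List (String × String)))
    (items : List (List (String × String))) : PySem.Dict String (List String) :=
  items.foldl (fun c i =>
    if pvPid i != "" && idm.contains (pvPid i) then
      c.modify (pvPid i) [] (· ++ [pvName i])
    else c) PySem.Dict.empty

-- while stack: nid = stack.pop(); result.append(id_map[nid]); stack.extend(reversed(children.get(nid, [])))
-- The Lean stack list is held top-first, so python's push-reversed-then-pop-from-the-end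
-- is exactly prepending the child list in order. The fuel bounds the number of pops;
-- under Pre_ the chosen fuel is sufficient (each subtree has at most (n+1)^(n+1) nodes).
def pvStack (idm : PySem.Dict String (List (String × String)))
    (ch : PySem.Dict String (List String)) :
    Nat → List String → List (List (String × String)) → List (List (String × String))
  | 0, _, res => res
  | _ + 1, [], res => res
  | fuel + 1, nid :: st, res =>
      pvStack idm ch fuel (PySem.Dict.getD ch nid [] ++ st) (res ++ [PySem.Dict.getD idm nid []])

def limit_discussions_alt (items : List (List (String × String))) (num_discussions : Int) :
    List (List (String × String)) :=
  let idm := pvIdMapB items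
  let ch := pvChildrenB idm items
  -- roots = [i['name'] for i in items if i['name'].startswith('t3_')]
  let roots := (items.filter (fun i => PySem.Str.startswith (pvName i) "t3_")).map pvName
  -- roots[:max(0, num_discussions)] — a slice with a nonnegative bound is take
  (roots.take (max 0 num_discussions).toNat).foldl
    (fun res rid => pvStack idm ch ((items.length + 1) ^ (items.length + 1)) [rid] res) []

-- ===== PRECONDITION & SPEC =====
-- fuelled longest-path depth in the children graph: pvDepth ch k n is the length of the
-- longest child chain from n explorable with k steps; it stabilises at the true depth
-- exactly when no cycle is reachable from n, and outgrows any bound otherwise.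
def pvMaxN (l : List Nat) : Nat := l.foldr max 0

def pvDepth (ch : PySem.Dict String (List String)) : Nat → String → Nat
  | 0, _ => 0
  | k + 1, n => pvMaxN ((PySem.Dict.getD ch n []).map (fun c => pvDepth ch k c + 1))

-- Pre_ excludes exactly the inputs where A raises: items without a 'name' key
-- (KeyError in the id_map comprehension), and inputs where some of the first
-- num_discussions 't3_' discussions reaches a parent_id cycle, so that
-- recurse_collect recurses forever (RecursionError).  The depth bound with fuel
-- 3n+2 holds iff no cycle is reachable from the processed roots: acyclic reply
-- graphs have depth < n, while a reachable cycle drives pvDepth above 2n.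
def Pre_limit_discussions (items : List (List (String × String))) (num_discussions : Int) : Prop :=
  (∀ i ∈ items, (PySem.Dict.get? (PySem.Dict.mk i) "name").isSome = true) ∧
  (∀ r ∈ (((items.filter (fun i => PySem.Str.startswith (pvName i) "t3_")).map pvName).take
            (max 0 num_discussions).toNat),
     pvDepth (pvChildren (pvIdMap items) items) (3 * items.length + 2) r ≤ items.length)
instance (items : List (List (String × String))) (num_discussions : Int) :
    Decidable (Pre_limit_discussions items num_discussions) := by
  unfold Pre_limit_discussions; infer_instance

def pvWitness_limit_discussions : (List (List (String × String))) × Int :=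
  ([[("name", "t3_a")], [("name", "t1_b"), ("parent_id", "t3_a")], [("name", "t3_c")]], 2)

def Spec_limit_discussions (items : List (List (String × String))) (num_discussions : Int) (out : List (List (String × String))) : Prop := out = limit_discussions_alt items num_discussions
instance (items : List (List (String × String))) (num_discussions : Int) (out : List (List (String × String))) : Decidable (Spec_limit_discussions items num_discussions out) := by unfold Spec_limit_discussions; infer_instance

-- ===== CLAIM (what is proved, stated in full; the proofs are below) =====
def Claim_equal_limit_discussions : Prop := ∀ (items : List (List (String × String))) (num_discussions : Int), Dom_limit_discussions items num_discussions → Pre_limit_discussions items num_discussions → Spec_limit_discussions items num_discussions (limit_discussions items num_discussions)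

-- ===== LEMMAS AND PROOFS =====

lemma le_pvMaxN {x : Nat} {l : List Nat} (h : x ∈ l) : x ≤ pvMaxN l := by
  induction l with
  | nil => cases h
  | cons a l ih =>
    rcases List.mem_cons.1 h with rfl | h
    · exact le_max_left _ _
    · exact le_trans (ih h) (le_max_right _ _)

lemma pvMaxN_le {m : Nat} {l : List Nat} (h : ∀ x ∈ l, x ≤ m) : pvMaxN l ≤ m := by
  induction l with
  | nil => exact Nat.zero_le m
  | cons a l ih =>
    exact max_le (h a (List.mem_cons_self)) (ih fun x hx => h x (List.mem_cons_of_mem _ hx))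

lemma pvMaxN_attained (l : List Nat) : pvMaxN l = 0 ∨ pvMaxN l ∈ l := by
  induction l with
  | nil => exact Or.inl rfl
  | cons a l ih =>
    show pvMaxN (a :: l) = 0 ∨ _
    rcases le_or_gt (pvMaxN l) a with h | h
    · right
      have : pvMaxN (a :: l) = a := max_eq_left h
      rw [this]; exact List.mem_cons_self
    · rcases ih with h0 | hm
      · left; show max a (pvMaxN l) = 0; omega
      · right; right; show max a (pvMaxN l) ∈ l; rw [max_eq_right (le_of_lt h)]; exact hm

lemma pvDepth_mono (ch : PySem.Dict String (List String)) (k : Nat) (n : String) :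
    pvDepth ch k n ≤ pvDepth ch (k + 1) n := by
  induction k generalizing n with
  | zero => exact Nat.zero_le _
  | succ k ih =>
    show pvMaxN _ ≤ pvMaxN _
    apply pvMaxN_le
    intro x hx
    obtain ⟨c, hc, rfl⟩ := List.mem_map.1 hx
    exact le_trans (by exact Nat.succ_le_succ (ih c))
      (le_pvMaxN (List.mem_map.2 ⟨c, hc, rfl⟩))

lemma pvDepth_edge (ch : PySem.Dict String (List String)) (k : Nat) {n c : String}
    (hc : c ∈ PySem.Dict.getD ch n []) :
    pvDepth ch k c + 1 ≤ pvDepth ch (k + 1) n :=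
  le_pvMaxN (List.mem_map.2 ⟨c, hc, rfl⟩)

lemma pvDepth_incr (ch : PySem.Dict String (List String)) (k : Nat) (n : String)
    (h : pvDepth ch k n < pvDepth ch (k + 1) n) : k ≤ pvDepth ch k n := by
  induction k generalizing n with
  | zero => exact Nat.zero_le _
  | succ k ih =>
    rcases pvMaxN_attained ((PySem.Dict.getD ch n []).map (fun c => pvDepth ch (k+1) c + 1)) with h0 | hm
    · change _ < pvMaxN _ at h; omega
    · obtain ⟨c, hc, hval⟩ := List.mem_map.1 hm
      -- pvDepth ch (k+2) n = pvDepth ch (k+1) c + 1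
      have h2 : pvDepth ch (k + 1 + 1) n = pvDepth ch (k + 1) c + 1 := hval.symm
      have hedge := pvDepth_edge ch k hc  -- pvDepth k c + 1 ≤ pvDepth (k+1) n
      have hcc : pvDepth ch k c < pvDepth ch (k + 1) c := by omega
      have := ih c hcc
      omega

lemma pvDepth_child (ch : PySem.Dict String (List String)) {L F : Nat} (hLF : L < F + 1)
    {n c : String} (hn : pvDepth ch (F + 1) n ≤ L) (hc : c ∈ PySem.Dict.getD ch n []) :
    pvDepth ch (F + 1) c < pvDepth ch (F + 1) n := by
  have hedge := pvDepth_edge ch F hc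
  have hmono := pvDepth_mono ch F c
  rcases eq_or_lt_of_le hmono with heq | hlt
  · omega
  · have := pvDepth_incr ch F c hlt
    omega

lemma pvRecurse_fuel_irrel (idm : PySem.Dict String (List (String × String)))
    (ch : PySem.Dict String (List String)) {L F : Nat} (hLF : L < F + 1) :
    ∀ f g n, pvDepth ch (F + 1) n ≤ L → pvDepth ch (F + 1) n < f → pvDepth ch (F + 1) n < g →
      pvRecurse idm ch f n = pvRecurse idm ch g n := by
  intro f
  induction f with
  | zero => intro g n _ hf; omega
  | succ f ih =>
    intro g n hL hf hg
    obtain ⟨g, rfl⟩ : ∃ g', g = g' + 1 := ⟨g - 1, by omega⟩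
    show _ :: _ = _ :: _
    congr 1
    apply List.flatMap_congr  -- maybe name differs
    intro c hc
    have hclt := pvDepth_child ch hLF hL hc
    exact ih g c (by omega) (by omega) (by omega)

lemma pvRecurse_unfold (idm : PySem.Dict String (List (String × String)))
    (ch : PySem.Dict String (List String)) {L F : Nat} (hLF : L < F + 1)
    {n : String} (hn : pvDepth ch (F + 1) n ≤ L) :
    pvRecurse idm ch (L + 1) n =
      PySem.Dict.getD idm n [] ::
        (PySem.Dict.getD ch n []).flatMap (pvRecurse idm ch (L + 1)) := by
  show _ :: _ = _ :: _
  congr 1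
  apply List.flatMap_congr
  intro c hc
  have hclt := pvDepth_child ch hLF hn hc
  exact pvRecurse_fuel_irrel idm ch hLF L (L+1) c (by omega) (by omega) (by omega)

lemma pvRecurse_len_bound (idm : PySem.Dict String (List (String × String)))
    (ch : PySem.Dict String (List String)) {L F : Nat} (hLF : L < F + 1)
    (hlen : ∀ m, (PySem.Dict.getD ch m []).length ≤ L) :
    ∀ d n, pvDepth ch (F + 1) n ≤ L → pvDepth ch (F + 1) n ≤ d →
      (pvRecurse idm ch (L + 1) n).length ≤ (L + 1) ^ (pvDepth ch (F + 1) n + 1) := by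
  intro d
  induction d with
  | zero =>
    intro n hL hd
    rw [pvRecurse_unfold idm ch hLF hL]
    have hkids : PySem.Dict.getD ch n [] = [] := by
      by_contra hne
      obtain ⟨c, hc⟩ := List.exists_mem_of_ne_nil _ hne
      have := pvDepth_child ch hLF hL hc
      omega
    simp [hkids]
    exact Nat.one_le_pow _ _ (by omega)
  | succ d ih =>
    intro n hL hd
    rw [pvRecurse_unfold idm ch hLF hL]
    have hsum : ((PySem.Dict.getD ch n []).flatMap (pvRecurse idm ch (L + 1))).length ≤
        (PySem.Dict.getD ch n []).length * (L + 1) ^ (pvDepth ch (F + 1) n) := by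
      rw [List.length_flatMap]
      have hb : ∀ x ∈ (PySem.Dict.getD ch n []).map (fun c => (pvRecurse idm ch (L + 1) c).length),
          x ≤ (L + 1) ^ (pvDepth ch (F + 1) n) := by
        intro x hx
        obtain ⟨c, hc, rfl⟩ := List.mem_map.1 hx
        have hclt := pvDepth_child ch hLF hL hc
        calc (pvRecurse idm ch (L + 1) c).length
            ≤ (L + 1) ^ (pvDepth ch (F + 1) c + 1) := ih c (by omega) (by omega)
          _ ≤ (L + 1) ^ (pvDepth ch (F + 1) n) :=
              Nat.pow_le_pow_right (by omega) (by omega)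
      calc ((PySem.Dict.getD ch n []).map (fun c => (pvRecurse idm ch (L + 1) c).length)).sum
          ≤ ((PySem.Dict.getD ch n []).map (fun c => (pvRecurse idm ch (L + 1) c).length)).length
              • (L + 1) ^ (pvDepth ch (F + 1) n) := List.sum_le_card_nsmul _ _ hb
        _ = (PySem.Dict.getD ch n []).length * (L + 1) ^ (pvDepth ch (F + 1) n) := by
              simp [List.length_map]
    have hkl := hlen n
    have hpow1 : 1 ≤ (L + 1) ^ (pvDepth ch (F + 1) n) := Nat.one_le_pow _ _ (by omega)
    have : (L + 1) ^ (pvDepth ch (F + 1) n + 1) = (L + 1) * (L + 1) ^ (pvDepth ch (F + 1) n) := by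
      ring
    simp only [List.length_cons]
    rw [this]
    have hmul : (PySem.Dict.getD ch n []).length * (L + 1) ^ (pvDepth ch (F + 1) n) ≤
        L * (L + 1) ^ (pvDepth ch (F + 1) n) := Nat.mul_le_mul_right _ hkl
    nlinarith

lemma pvStack_drain (idm : PySem.Dict String (List (String × String)))
    (ch : PySem.Dict String (List String)) {L F : Nat} (hLF : L < F + 1) :
    ∀ fuel st res, (∀ n ∈ st, pvDepth ch (F + 1) n ≤ L) →
      (st.map (fun n => (pvRecurse idm ch (L + 1) n).length)).sum ≤ fuel →
      pvStack idm ch fuel st res = res ++ st.flatMap (pvRecurse idm ch (L + 1)) := by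
  intro fuel
  induction fuel with
  | zero =>
    intro st res hg hs
    cases st with
    | nil => simp [pvStack]
    | cons n st =>
      exfalso
      have : (pvRecurse idm ch (L + 1) n).length ≥ 1 := by
        rw [pvRecurse_unfold idm ch hLF (hg n List.mem_cons_self)]
        simp
      rw [List.map_cons, List.sum_cons] at hs
      omega
  | succ fuel ih =>
    intro st res hg hs
    cases st with
    | nil => simp [pvStack]
    | cons n st =>
      show pvStack idm ch fuel (PySem.Dict.getD ch n [] ++ st) (res ++ [PySem.Dict.getD idm n []]) = _
      have hgn := hg n List.mem_cons_self
      have hkidsgood : ∀ c ∈ PySem.Dict.getD ch n [] ++ st, pvDepth ch (F + 1) c ≤ L := by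
        intro c hc
        rcases List.mem_append.1 hc with hc | hc
        · have := pvDepth_child ch hLF hgn hc; omega
        · exact hg c (List.mem_cons_of_mem _ hc)
      have hlenfact : (pvRecurse idm ch (L + 1) n).length =
          1 + (((PySem.Dict.getD ch n []).map (fun c => (pvRecurse idm ch (L + 1) c).length)).sum) := by
        rw [pvRecurse_unfold idm ch hLF hgn]
        simp [List.length_flatMap]
        omega
      have hsum2 : (((PySem.Dict.getD ch n [] ++ st).map
          (fun c => (pvRecurse idm ch (L + 1) c).length)).sum) ≤ fuel := by
        rw [List.map_append, List.sum_append]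
        rw [List.map_cons, List.sum_cons] at hs
        omega
      rw [ih _ _ hkidsgood hsum2, List.flatMap_cons, List.flatMap_append,
        pvRecurse_unfold idm ch hLF hgn]
      simp

lemma foldl_if_filter_map {α β δ : Type} (p : α → Bool) (h : α → β) (g : δ → β → δ) :
    ∀ (l : List α) (a : δ),
      l.foldl (fun acc x => if p x then g acc (h x) else acc) a = ((l.filter p).map h).foldl g a := by
  intro l
  induction l with
  | nil => intro a; rfl
  | cons x l ih =>
    intro a
    rw [List.foldl_cons, List.filter_cons]
    by_cases hp : p x = true
    · simp [hp, ih]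
    · simp [hp, ih]

lemma pvChildren_len (items : List (List (String × String)))
    (idm : PySem.Dict String (List (String × String))) (n : String) :
    (PySem.Dict.getD (pvChildren idm items) n []).length ≤ items.length := by
  have hfold : pvChildren idm items =
      ((items.filter (fun i => pvPid i != "" && idm.contains (pvPid i))).map
        (fun i => (pvPid i, pvName i))).foldl
        (fun (d : PySem.Dict String (List String)) (p : String × String) =>
          d.modify p.1 [] (· ++ [p.2])) PySem.Dict.empty :=
    foldl_if_filter_map (fun i => pvPid i != "" && idm.contains (pvPid i))
      (fun i => (pvPid i, pvName i))
      (fun (d : PySem.Dict String (List String)) (p : String × String) =>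
        d.modify p.1 [] (· ++ [p.2])) items PySem.Dict.empty
  rw [hfold, PySem.Dict.getD_foldl_modify_append]
  simp only [PySem.Dict.getD_empty, List.nil_append, List.length_map]
  exact le_trans (List.length_filter_le _ _)
    (by rw [List.length_map]; exact List.length_filter_le _ _)

lemma pvLoopA_eq (items : List (List (String × String))) (nd : Int) :
    ∀ rest cnt res,
      pvLoopA (pvIdMap items) (pvChildren (pvIdMap items) items) (items.length + 1) nd rest cnt res =
        res ++ (((rest.filter (fun i => PySem.Str.startswith (pvName i) "t3_")).map pvName).take
          (nd - cnt).toNat).flatMap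
            (pvRecurse (pvIdMap items) (pvChildren (pvIdMap items) items) (items.length + 1)) := by
  intro rest
  induction rest with
  | nil => intro cnt res; simp [pvLoopA]
  | cons i rest ih =>
    intro cnt res
    rw [List.filter_cons]
    by_cases hroot : PySem.Str.startswith (pvName i) "t3_" = true
    · have hroot' : PySem.Chars.startswith (pvName i).toList ['t', '3', '_'] = true := by
        simpa using hroot
      by_cases hcnt : cnt ≥ nd
      · have h0 : (nd - cnt).toNat = 0 := by omega
        simp only [pvLoopA]
        rw [if_pos hroot, if_pos hcnt]
        simp [h0]
      · have h1 : (nd - cnt).toNat = (nd - (cnt + 1)).toNat + 1 := by omega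
        simp only [pvLoopA]
        rw [if_pos hroot, if_neg hcnt, ih (cnt + 1), h1]
        simp [hroot', List.take_succ_cons]
    · have hroot' : ¬ PySem.Chars.startswith (pvName i).toList ['t', '3', '_'] = true := by
        simpa using hroot
      simp only [pvLoopA]
      rw [if_neg hroot, ih cnt]
      simp [hroot']

lemma pvFoldB_eq (items : List (List (String × String))) :
    ∀ (roots : List String) (res : List (List (String × String))), (∀ r ∈ roots,
        pvDepth (pvChildren (pvIdMap items) items) (3 * items.length + 2) r ≤ items.length) →
      roots.foldl (fun res rid => pvStack (pvIdMap items) (pvChildren (pvIdMap items) items)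
          ((items.length + 1) ^ (items.length + 1)) [rid] res) res =
        res ++ roots.flatMap
          (pvRecurse (pvIdMap items) (pvChildren (pvIdMap items) items) (items.length + 1)) := by
  intro roots
  induction roots with
  | nil => intro res h; simp
  | cons r roots ih =>
    intro res h
    have hLF : items.length < (3 * items.length + 1) + 1 := by omega
    have hgr : pvDepth (pvChildren (pvIdMap items) items) ((3 * items.length + 1) + 1) r ≤ items.length := by
      have := h r List.mem_cons_self
      have h32 : 3 * items.length + 2 = (3 * items.length + 1) + 1 := by omega
      rwa [h32] at this
    rw [List.foldl_cons]
    rw [pvStack_drain (pvIdMap items) (pvChildren (pvIdMap items) items) hLF _ [r] res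
      (by intro x hx; rw [List.mem_singleton] at hx; subst hx; exact hgr)
      (by
        simp only [List.map_cons, List.map_nil, List.sum_cons, List.sum_nil, Nat.add_zero]
        calc (pvRecurse (pvIdMap items) (pvChildren (pvIdMap items) items) (items.length + 1) r).length
            ≤ (items.length + 1) ^ (pvDepth (pvChildren (pvIdMap items) items) ((3 * items.length + 1) + 1) r + 1) :=
              pvRecurse_len_bound _ _ hLF (fun m => pvChildren_len items _ m) items.length r hgr hgr
          _ ≤ (items.length + 1) ^ (items.length + 1) :=
              Nat.pow_le_pow_right (by omega) (by omega))]
    rw [ih _ (fun x hx => h x (List.mem_cons_of_mem _ hx))]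
    simp

-- ===== VERDICT (by name: the statement is the Claim_ definition above) =====
theorem limit_discussions_spec : Claim_equal_limit_discussions := by
  intro items nd _ hpre
  obtain ⟨-, hgood⟩ := hpre
  show limit_discussions items nd = limit_discussions_alt items nd
  have hA : limit_discussions items nd =
      pvLoopA (pvIdMap items) (pvChildren (pvIdMap items) items) (items.length + 1) nd items 0 [] := rfl
  have hB : limit_discussions_alt items nd =
      (((items.filter (fun i => PySem.Str.startswith (pvName i) "t3_")).map pvName).take
          (max 0 nd).toNat).foldl
        (fun res rid => pvStack (pvIdMap items) (pvChildren (pvIdMap items) items)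
          ((items.length + 1) ^ (items.length + 1)) [rid] res) [] := rfl
  rw [hA, hB, pvLoopA_eq items nd items 0 [], pvFoldB_eq items _ [] hgood]
  have h0 : (nd - 0).toNat = (max 0 nd).toNat := by omega
  rw [h0]
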